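-- pv_equiv track=rewrite | github.com/TrkCsb/hackathon-TCs | drop_test/main.py | minDropNumbr
-- ===== SOURCE A (Python) =====
-- def minDropNumbr(n, h):
--     dp = [0] * (n + 1)
--     moves = 0
--
--     while dp[n] < h:
--         moves += 1
--         for k in range(n, 0, -1):
--             dp[k] = dp[k] + dp[k - 1] + 1
--     return moves
-- ===== SOURCE B (Python) =====
-- def minDropNumbr(n, h):
--     if h <= 0:
--         return 0
--
--     def reaches(m):
--         # partial sums of C(m, i), stopping as soon as h is reached
--         total, term = 0, 1
--         for i in range(1, min(m, n) + 1):
--             term = term * (m - i + 1) // i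
--             total += term
--             if total >= h:
--                 break
--         return total
--
--     lo, hi = 0, h
--     while lo < hi:
--         mid = (lo + hi) // 2
--         if reaches(mid) >= h:
--             hi = mid
--         else:
--             lo = mid + 1
--     return lo
-- ===== Notes on version B (the rewrite author's own statement) =====
-- stated objective: faster
-- what changed: Replaces the O(answer*n) repeated Pascal-style dp table updates with a binary search over the number of moves, testing each candidate m by an early-exiting partial sum of binomial coefficients C(m,i).
-- outside the precondition, e.g. on minDropNumbr(0, 3): A does not finish within the time limit, B returns 3; on minDropNumbr(-1, 5): A raises IndexError, B returns 5
import Mathlib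
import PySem

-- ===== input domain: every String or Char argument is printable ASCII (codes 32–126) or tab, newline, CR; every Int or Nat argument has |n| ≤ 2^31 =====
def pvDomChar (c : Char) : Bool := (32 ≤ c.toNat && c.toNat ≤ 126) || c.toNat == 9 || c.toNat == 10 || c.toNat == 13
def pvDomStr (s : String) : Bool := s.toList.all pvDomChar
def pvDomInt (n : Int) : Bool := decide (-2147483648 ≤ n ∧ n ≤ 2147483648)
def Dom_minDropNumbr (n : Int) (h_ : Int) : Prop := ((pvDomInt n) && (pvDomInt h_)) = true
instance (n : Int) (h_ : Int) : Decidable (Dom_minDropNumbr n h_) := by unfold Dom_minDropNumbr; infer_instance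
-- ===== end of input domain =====

-- B replaces A's repeated O(n) dp-table updates (one per move counted) by a binary search on the
-- number of moves, testing a candidate m via an early-exiting partial sum of binomial coefficients.

-- ===== PORT A =====
-- inner loop:  for k in range(n, 0, -1): dp[k] = dp[k] + dp[k-1] + 1
-- (the Python list mutated in place is ported as Array; the loop counts k down from n to 1)
def innerA : Nat → Int → Array Int → Array Int
  | 0, _, dp => dp
  | c + 1, k, dp =>
      innerA c (k - 1)
        (dp.setIfInBounds k.toNat (dp.getD k.toNat 0 + dp.getD (k - 1).toNat 0 + 1))

def stepA (n : Int) (dp : Array Int) : Array Int := innerA n.toNat n dp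

-- while dp[n] < h: moves += 1; <inner loop>   — fuel h_.toNat suffices on Pre_ (dp[n] grows by ≥ 1
-- per iteration when n ≥ 1), so the fuel guard only makes the same computation total.
def loopA (n : Int) (h_ : Int) : Nat → Array Int → Int → Int
  | 0, _, moves => moves
  | fuel + 1, dp, moves =>
    if dp.getD n.toNat 0 < h_ then
      loopA n h_ fuel (stepA n dp) (moves + 1)
    else moves

def minDropNumbr (n : Int) (h_ : Int) : Int :=
  loopA n h_ h_.toNat (List.replicate (n + 1).toNat 0).toArray 0

-- ===== PORT B =====
-- for i in range(1, min(m, n)+1): term = term*(m-i+1)//i; total += term; if total >= h: break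
def reachGo (h_ m : Int) : Int → Int → Int → Nat → Int
  | total, _, _, 0 => total
  | total, term, i, c + 1 =>
    let term' := PySem.Int.floordiv (term * (m - i + 1)) i
    let total' := total + term'
    if total' ≥ h_ then total'
    else reachGo h_ m total' term' (i + 1) c

def reaches (n h_ m : Int) : Int :=
  reachGo h_ m 0 1 1 (min m n).toNat

-- while lo < hi: mid = (lo+hi)//2; if reaches(mid) >= h: hi = mid else lo = mid+1
def bsB (n h_ : Int) : Int → Int → Nat → Int
  | lo, _, 0 => lo
  | lo, hi, fuel + 1 =>
    if lo < hi then
      let mid := PySem.Int.floordiv (lo + hi) 2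
      if reaches n h_ mid ≥ h_ then bsB n h_ lo mid fuel
      else bsB n h_ (mid + 1) hi fuel
    else lo

def minDropNumbr_alt (n : Int) (h_ : Int) : Int :=
  if h_ ≤ 0 then 0
  else bsB n h_ 0 h_ h_.toNat

-- ===== PRECONDITION & SPEC =====
-- Pre_ excludes n < 0 (A raises IndexError on dp[n]) and n = 0 with h > 0 (A loops forever).
def Pre_minDropNumbr (n : Int) (h_ : Int) : Prop := 0 ≤ n ∧ (1 ≤ n ∨ h_ ≤ 0)
instance (n : Int) (h_ : Int) : Decidable (Pre_minDropNumbr n h_) := by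
  unfold Pre_minDropNumbr; infer_instance

def pvWitness_minDropNumbr : Int × Int := (3, 10)

def Spec_minDropNumbr (n : Int) (h_ : Int) (out : Int) : Prop := out = minDropNumbr_alt n h_
instance (n : Int) (h_ : Int) (out : Int) : Decidable (Spec_minDropNumbr n h_ out) := by
  unfold Spec_minDropNumbr; infer_instance

-- ===== CLAIM (what is proved, stated in full; the proofs are below) =====
def Claim_equal_minDropNumbr : Prop := ∀ (n : Int) (h_ : Int), Dom_minDropNumbr n h_ →
  Pre_minDropNumbr n h_ → Spec_minDropNumbr n h_ (minDropNumbr n h_)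

-- ===== LEMMAS AND PROOFS =====

-- sumChoose m k = Σ_{i=1..k} C(m,i): the mathematical value both programs compute with.
def sumChoose (m k : Nat) : Nat := ∑ i ∈ Finset.Icc 1 k, m.choose i

theorem sumChoose_zero_right (m : Nat) : sumChoose m 0 = 0 := by
  simp [sumChoose]

theorem sumChoose_succ (m k : Nat) :
    sumChoose m (k + 1) = sumChoose m k + m.choose (k + 1) := by
  unfold sumChoose
  rw [Finset.sum_Icc_succ_top (by omega)]

theorem sumChoose_zero_left (k : Nat) : sumChoose 0 k = 0 := by
  induction k with
  | zero => simp [sumChoose]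
  | succ k ih => rw [sumChoose_succ, ih, Nat.choose_eq_zero_of_lt (by omega)]

theorem sumChoose_rec (m k : Nat) :
    sumChoose (m + 1) (k + 1) = sumChoose m (k + 1) + sumChoose m k + 1 := by
  induction k with
  | zero =>
    simp [sumChoose]
  | succ k ih =>
    have e1 := sumChoose_succ (m + 1) (k + 1)
    have e2 := sumChoose_succ m (k + 1)
    have e3 := sumChoose_succ m k
    have e4 := Nat.choose_succ_succ m (k + 1)
    simp only [Nat.succ_eq_add_one] at e4
    omega

theorem sumChoose_mono_left {m m' : Nat} (h : m ≤ m') (k : Nat) :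
    sumChoose m k ≤ sumChoose m' k := by
  induction m', h using Nat.le_induction with
  | base => exact le_rfl
  | succ m'' hm ih =>
    refine le_trans ih ?_
    cases k with
    | zero => simp [sumChoose_zero_right]
    | succ k => rw [sumChoose_rec]; omega

theorem sumChoose_mono_right (m : Nat) {k k' : Nat} (h : k ≤ k') :
    sumChoose m k ≤ sumChoose m k' := by
  induction k', h using Nat.le_induction with
  | base => exact le_rfl
  | succ k'' hk ih => rw [sumChoose_succ]; omega

theorem self_le_sumChoose (m : Nat) {k : Nat} (hk : 1 ≤ k) :
    m ≤ sumChoose m k := by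
  have h1 : (1 : Nat) ∈ Finset.Icc 1 k := by simp [Finset.mem_Icc]; omega
  have := Finset.single_le_sum (f := fun i => m.choose i)
    (fun i _ => Nat.zero_le _) h1
  simpa [Nat.choose_one_right, sumChoose] using this

theorem sumChoose_of_le (m k : Nat) (h : m ≤ k) : sumChoose m k = sumChoose m m := by
  induction k with
  | zero =>
    have h0 : m = 0 := by omega
    subst h0
    rfl
  | succ k ih =>
    rcases Nat.eq_or_lt_of_le h with h1 | h2
    · simp [h1]
    · rw [sumChoose_succ, Nat.choose_eq_zero_of_lt (by omega), ih (by omega)]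
      omega

theorem sumChoose_min (m k : Nat) : sumChoose m (min m k) = sumChoose m k := by
  rcases le_or_gt k m with h | h
  · rw [Nat.min_eq_right h]
  · rw [Nat.min_eq_left (by omega), sumChoose_of_le m k (by omega),
      sumChoose_of_le m m (le_refl m)]

-- dp after m full passes of the inner loop (when the table has indices 0..N)
def dpvec (m N : Nat) : List Int := (List.range (N + 1)).map (fun k => (sumChoose m k : Int))

theorem length_dpvec (m N : Nat) : (dpvec m N).length = N + 1 := by
  simp [dpvec]

theorem getD_dpvec (m N j : Nat) (hj : j ≤ N) :
    (dpvec m N).getD j 0 = (sumChoose m j : Int) := by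
  simp [dpvec, List.getD_eq_getElem?_getD, List.getElem?_map,
    List.getElem?_range (by omega : j < N + 1)]

theorem getD_toArray (xs : List Int) (i : Nat) (d : Int) :
    (xs.toArray).getD i d = xs.getD i d := by
  unfold Array.getD
  split
  · rename_i h
    simp only [List.size_toArray] at h
    rw [List.getD_eq_getElem?_getD, List.getElem?_eq_getElem h]
    simp
  · rename_i h
    simp only [List.size_toArray] at h
    rw [List.getD_eq_getElem?_getD, List.getElem?_eq_none (by omega)]
    rfl

-- effect of the inner countdown loop: indices 1..c get xs[j] + xs[j-1] + 1, others unchanged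
theorem innerA_spec (c : Nat) : ∀ (xs : List Int), c < xs.length →
    ∃ ys : List Int, innerA c (c : Int) xs.toArray = ys.toArray ∧ ys.length = xs.length ∧
      ∀ j : Nat, ys.getD j 0 =
        if 1 ≤ j ∧ j ≤ c then xs.getD j 0 + xs.getD (j - 1) 0 + 1 else xs.getD j 0 := by
  induction c with
  | zero =>
    intro xs _
    exact ⟨xs, rfl, rfl, fun j => by rw [if_neg (by omega)]⟩
  | succ k ih =>
    intro xs hlen
    rw [innerA]
    have ht1 : ((k + 1 : Nat) : Int).toNat = k + 1 := by omega
    have ht0 : (((k + 1 : Nat) : Int) - 1).toNat = k := by omega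
    have hsub : ((k + 1 : Nat) : Int) - 1 = (k : Int) := by omega
    rw [ht1, ht0, hsub, getD_toArray, getD_toArray, List.setIfInBounds_toArray]
    set v := xs.getD (k + 1) 0 + xs.getD k 0 + 1 with hv
    set xs' := xs.set (k + 1) v with hxs'
    have hlen' : xs'.length = xs.length := by simp [hxs']
    obtain ⟨ys, hy1, hy2, hy3⟩ := ih xs' (by omega)
    refine ⟨ys, hy1, by omega, ?_⟩
    intro j
    rw [hy3 j]
    have hget : ∀ i : Nat, xs'.getD i 0 =
        if i = k + 1 then xs.getD (k + 1) 0 + xs.getD k 0 + 1 else xs.getD i 0 := by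
      intro i
      by_cases hi : i = k + 1
      · subst hi
        rw [hxs', if_pos rfl, List.getD_eq_getElem?_getD,
          List.getElem?_set_self (by omega), ← hv]
        simp
      · rw [hxs', if_neg hi, List.getD_eq_getElem?_getD,
          List.getElem?_set_ne (by omega), ← List.getD_eq_getElem?_getD]
    by_cases hj1 : 1 ≤ j ∧ j ≤ k
    · rw [if_pos hj1, if_pos (by omega)]
      rw [hget j, hget (j - 1), if_neg (by omega), if_neg (by omega)]
    · by_cases hj2 : j = k + 1
      · subst hj2
        rw [if_neg (by omega), if_pos (by omega), hget (k + 1), if_pos rfl]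
        simp
      · rw [if_neg hj1, if_neg (by omega), hget j, if_neg (by omega)]

theorem stepA_dpvec (m N : Nat) :
    stepA (N : Int) (dpvec m N).toArray = (dpvec (m + 1) N).toArray := by
  unfold stepA
  rw [show ((N : Int)).toNat = N by omega]
  obtain ⟨ys, hy1, hy2, hy3⟩ := innerA_spec N (dpvec m N) (by rw [length_dpvec]; omega)
  rw [hy1]
  congr 1
  apply List.ext_getElem
  · rw [hy2, length_dpvec, length_dpvec]
  · intro i h1 h2
    have hiN : i ≤ N := by rw [hy2, length_dpvec] at h1; omega
    have hA := hy3 i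
    rw [List.getD_eq_getElem?_getD, List.getElem?_eq_getElem h1] at hA
    simp only [Option.getD_some] at hA
    rw [hA]
    have hB : (dpvec (m + 1) N)[i] = ((sumChoose (m + 1) i : Nat) : Int) := by
      have := getD_dpvec (m + 1) N i hiN
      rw [List.getD_eq_getElem?_getD, List.getElem?_eq_getElem h2] at this
      simpa using this
    rw [hB]
    by_cases hi : 1 ≤ i ∧ i ≤ N
    · rw [if_pos hi, getD_dpvec m N i hiN, getD_dpvec m N (i - 1) (by omega)]
      obtain ⟨hi1, _⟩ := hi
      obtain ⟨i', rfl⟩ : ∃ i', i = i' + 1 := ⟨i - 1, by omega⟩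
      rw [sumChoose_rec]
      push_cast
      ring
    · have hi0 : i = 0 := by omega
      subst hi0
      rw [if_neg hi, getD_dpvec m N 0 (by omega)]
      simp [sumChoose_zero_right]

-- A's loop returns the least m with h ≤ sumChoose m N, given enough fuel
theorem loopA_eq (N : Nat) (h_ : Int)
    (M : Nat) (hM : h_ ≤ (sumChoose M N : Int))
    (hMin : ∀ m' : Nat, m' < M → ¬ h_ ≤ (sumChoose m' N : Int)) :
    ∀ (fuel m : Nat), m ≤ M → M ≤ m + fuel →
      loopA (N : Int) h_ fuel (dpvec m N).toArray (m : Int) = (M : Int) := by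
  intro fuel
  induction fuel with
  | zero =>
    intro m h1 h2
    have : m = M := by omega
    simp [loopA, this]
  | succ fuel ih =>
    intro m h1 h2
    rw [loopA]
    rw [show ((N : Int)).toNat = N by omega, getD_toArray, getD_dpvec m N N (by omega)]
    by_cases hc : (sumChoose m N : Int) < h_
    · rw [if_pos hc]
      have hmM : m < M := by
        rcases Nat.lt_or_ge m M with h | h
        · exact h
        · exact absurd (le_trans hM (Nat.cast_le.mpr (sumChoose_mono_left h N))) (by omega)
      rw [stepA_dpvec]
      have := ih (m + 1) (by omega) (by omega)
      rw [show ((m : Int) + 1) = ((m + 1 : Nat) : Int) by push_cast; ring]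
      exact this
    · rw [if_neg hc]
      have h4 : ¬ m < M := fun h => hMin m h (by omega)
      have h5 : m = M := by omega
      exact_mod_cast h5

-- exact binomial term update: term*(m-i+1)//i advances C(m',j) to C(m',j+1)
theorem term_update (m' j : Nat) (hj : j < m') :
    PySem.Int.floordiv ((m'.choose j : Int) * ((m' : Int) - ((j : Int) + 1) + 1)) ((j : Int) + 1)
      = (m'.choose (j + 1) : Int) := by
  have hsub : (m' : Int) - ((j : Int) + 1) + 1 = ((m' - j : Nat) : Int) := by
    push_cast [Nat.cast_sub (by omega : j ≤ m')]; ring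
  have hkey : m'.choose j * (m' - j) = m'.choose (j + 1) * (j + 1) :=
    (Nat.choose_succ_right_eq m' j).symm
  rw [hsub, show ((j : Int) + 1) = ((j + 1 : Nat) : Int) by push_cast; ring]
  rw [show ((m'.choose j : Int) * ((m' - j : Nat) : Int)) = ((m'.choose j * (m' - j) : Nat) : Int)
    by push_cast; ring, hkey]
  rw [PySem.Int.floordiv_natCast, Nat.mul_div_cancel _ (by omega : 0 < j + 1)]

-- the early-exiting partial-sum loop decides h ≤ sumChoose m' stop
theorem reachGo_iff (h_ : Int) (m' stop : Nat) (hstop : stop ≤ m') :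
    ∀ (c j : Nat), j + c = stop → (sumChoose m' j : Int) < h_ →
      (h_ ≤ reachGo h_ (m' : Int) (sumChoose m' j : Int) (m'.choose j : Int) ((j : Int) + 1) c
        ↔ h_ ≤ (sumChoose m' stop : Int)) := by
  intro c
  induction c with
  | zero =>
    intro j hj hlt
    have : j = stop := by omega
    subst this
    rw [reachGo]
  | succ c ih =>
    intro j hj hlt
    rw [reachGo]
    rw [term_update m' j (by omega)]
    rw [show (sumChoose m' j : Int) + (m'.choose (j + 1) : Int) = (sumChoose m' (j + 1) : Int) by
      rw [sumChoose_succ]; push_cast; ring]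
    by_cases hge : (sumChoose m' (j + 1) : Int) ≥ h_
    · rw [if_pos hge]
      have hmono : sumChoose m' (j + 1) ≤ sumChoose m' stop := sumChoose_mono_right m' (by omega)
      constructor
      · intro _
        omega
      · intro _; exact hge
    · rw [if_neg hge]
      rw [show ((j : Int) + 1 + 1) = (((j + 1 : Nat) : Int) + 1) by push_cast; ring]
      exact ih (j + 1) (by omega) (by omega)

theorem reaches_iff (n h_ m : Int) (hn : 1 ≤ n) (hm : 0 ≤ m) (hh : 1 ≤ h_) :
    (h_ ≤ reaches n h_ m ↔ h_ ≤ (sumChoose m.toNat n.toNat : Int)) := by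
  unfold reaches
  have hmin : (min m n).toNat = min m.toNat n.toNat := by omega
  have hstart := reachGo_iff h_ m.toNat (min m.toNat n.toNat) (by omega)
    (min m.toNat n.toNat) 0 (by omega)
    (by rw [sumChoose_zero_right]; push_cast; omega)
  rw [sumChoose_zero_right, sumChoose_min] at hstart
  have hm' : ((m.toNat : Int)) = m := by omega
  simpa [hmin, hm', Nat.choose_zero_right] using hstart

-- B's binary search converges to the least m with the predicate
theorem bsB_eq (n h_ : Int) (hn : 1 ≤ n) (hh : 1 ≤ h_)
    (M : Nat) (hM : h_ ≤ (sumChoose M n.toNat : Int))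
    (hMin : ∀ m' : Nat, m' < M → ¬ h_ ≤ (sumChoose m' n.toNat : Int)) :
    ∀ (fuel : Nat) (lo hi : Int), 0 ≤ lo → lo ≤ (M : Int) → (M : Int) ≤ hi →
      (hi - lo).toNat ≤ fuel → bsB n h_ lo hi fuel = (M : Int) := by
  intro fuel
  induction fuel with
  | zero =>
    intro lo hi h0 h1 h2 h3
    rw [bsB]
    omega
  | succ fuel ih =>
    intro lo hi h0 h1 h2 h3
    rw [bsB]
    by_cases hlh : lo < hi
    · rw [if_pos hlh]
      obtain ⟨hmid1, hmid2⟩ := PySem.Int.floordiv_two_mid_bounds (le_of_lt hlh)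
      have hmidlt : PySem.Int.floordiv (lo + hi) 2 < hi := by
        rw [PySem.Int.floordiv_eq_ediv_of_pos (by omega)]
        omega
      set mid := PySem.Int.floordiv (lo + hi) 2 with hmid
      have hmid0 : 0 ≤ mid := by omega
      by_cases hp : reaches n h_ mid ≥ h_
      · rw [if_pos hp]
        have hQ : h_ ≤ (sumChoose mid.toNat n.toNat : Int) := (reaches_iff n h_ mid hn hmid0 hh).mp hp
        have hMle : (M : Int) ≤ mid := by
          by_contra hcon
          exact hMin mid.toNat (by omega) hQ
        exact ih lo mid h0 h1 hMle (by omega)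
      · rw [if_neg hp]
        have hQ : ¬ h_ ≤ (sumChoose mid.toNat n.toNat : Int) := fun hq =>
          hp ((reaches_iff n h_ mid hn hmid0 hh).mpr hq)
        have hMgt : mid + 1 ≤ (M : Int) := by
          by_contra hcon
          exact hQ (le_trans hM (by exact_mod_cast sumChoose_mono_left (by omega : M ≤ mid.toNat) n.toNat))
        exact ih (mid + 1) hi (by omega) hMgt h2 (by omega)
    · rw [if_neg hlh]
      omega

theorem replicate_eq_dpvec (N : Nat) : List.replicate (N + 1) (0 : Int) = dpvec 0 N := by
  unfold dpvec
  symm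
  rw [List.eq_replicate_iff]
  constructor
  · simp
  · intro b hb
    simp only [List.mem_map] at hb
    obtain ⟨k, _, rfl⟩ := hb
    simp [sumChoose_zero_left]

-- ===== VERDICT (by name: the statement is the Claim_ definition above) =====
theorem minDropNumbr_spec : Claim_equal_minDropNumbr := by
  intro n h_ _ hpre
  obtain ⟨hn0, hpre2⟩ := hpre
  unfold Spec_minDropNumbr minDropNumbr minDropNumbr_alt
  by_cases hh : h_ ≤ 0
  · rw [if_pos hh]
    have : h_.toNat = 0 := by omega
    rw [this, loopA]
  · rw [if_neg hh]
    have hh1 : 1 ≤ h_ := by omega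
    have hn1 : 1 ≤ n := by
      rcases hpre2 with h | h
      · exact h
      · omega
    set N := n.toNat with hN
    have hN1 : 1 ≤ N := by omega
    -- the least m with h_ ≤ sumChoose m N exists (sumChoose h N ≥ h)
    have hex : h_ ≤ (sumChoose h_.toNat N : Int) := by
      have := self_le_sumChoose h_.toNat hN1
      omega
    have hfind : ∃ m : Nat, h_ ≤ (sumChoose m N : Int) := ⟨h_.toNat, hex⟩
    set M := Nat.find hfind with hM
    have hMspec : h_ ≤ (sumChoose M N : Int) := Nat.find_spec hfind
    have hMmin : ∀ m' : Nat, m' < M → ¬ h_ ≤ (sumChoose m' N : Int) := fun m' hm' =>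
      Nat.find_min hfind hm'
    have hMle : M ≤ h_.toNat := Nat.find_le hex
    have hrepl : (n + 1).toNat = N + 1 := by omega
    have hA : loopA n h_ h_.toNat (List.replicate (n + 1).toNat 0).toArray 0 = (M : Int) := by
      rw [hrepl, replicate_eq_dpvec]
      have := loopA_eq N h_ M hMspec hMmin h_.toNat 0 (by omega) (by omega)
      rw [show ((N : Int)) = n by omega] at this
      simpa using this
    have hB : bsB n h_ 0 h_ h_.toNat = (M : Int) := by
      apply bsB_eq n h_ hn1 hh1 M hMspec hMmin h_.toNat 0 h_ (by omega) (by omega) (by omega)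
      omega
    rw [hA, hB]
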